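-- pv_equiv track=rewrite | github.com/Fondamenti18/fondamenti-di-programmazione | students/1746561/homework01/program01.py | div_propri
-- ===== SOURCE A (Python) =====
-- from collections import Counter
--
-- def div_propri(ls): #Restituisce il numero di divisori propri
--     n = 1
--     i = 0
--     diz = Counter(ls)
--     val = list(diz.values())
--     for i in range(len(diz)):
--         n *= val[i]+1
--         i+=1
--     return n-2
-- ===== SOURCE B (Python) =====
-- def div_propri(ls):  # number of proper divisors from the prime-factor list
--     n = 1
--     s = sorted(ls)
--     i = 0
--     while i < len(s):
--         j = i + 1
--         while j < len(s) and s[j] == s[i]: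
--             j += 1
--         n *= (j - i) + 1
--         i = j
--     return n - 2
-- ===== Notes on version B (the rewrite author's own statement) =====
-- stated objective: alternative
-- what changed: Replaces the Counter hash table and the index loop over its values by sorting a copy of the list and multiplying (run length + 1) over each run of equal elements in a single run-length scan.
import Mathlib
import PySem

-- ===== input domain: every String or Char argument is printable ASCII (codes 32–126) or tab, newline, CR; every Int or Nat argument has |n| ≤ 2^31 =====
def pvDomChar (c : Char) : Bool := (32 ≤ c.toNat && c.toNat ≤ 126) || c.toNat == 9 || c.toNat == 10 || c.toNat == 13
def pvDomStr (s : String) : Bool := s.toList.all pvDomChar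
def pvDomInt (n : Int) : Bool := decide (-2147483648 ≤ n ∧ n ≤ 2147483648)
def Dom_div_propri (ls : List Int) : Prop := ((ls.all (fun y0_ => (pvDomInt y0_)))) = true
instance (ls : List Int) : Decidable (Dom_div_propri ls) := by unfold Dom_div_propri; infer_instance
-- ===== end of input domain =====

-- B replaces A's Counter hash table by a sort-then-run-length scan (objective: alternative).

-- ===== PORT A =====
def div_propri (ls : List Int) : Int :=
  let diz := PySem.Dict.counter ls
  let val := diz.values
  let n := (PySem.List.pyRange 0 (PySem.Dict.size diz : Int) 1).foldl
      (fun n i => n * (PySem.List.pyGetD val i 0 + 1)) 1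
  n - 2

-- ===== PORT B =====
-- the outer while loop of Source B: consume one run of equal leading elements per step
def pvRunLoop : List Int → Int → Int
  | [], n => n
  | x :: rest, n =>
      pvRunLoop (rest.dropWhile (fun y => y == x))
        (n * (((rest.takeWhile (fun y => y == x)).length : Int) + 2))
termination_by s _ => s.length
decreasing_by
  simp only [List.length_cons]
  exact Nat.lt_succ_of_le (List.length_dropWhile_le _ _)

def div_propri_alt (ls : List Int) : Int :=
  pvRunLoop (PySem.List.sorted ls (fun x => x) false) 1 - 2

-- ===== PRECONDITION & SPEC =====
def Spec_div_propri (ls : List Int) (out : Int) : Prop := out = div_propri_alt ls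
instance (ls : List Int) (out : Int) : Decidable (Spec_div_propri ls out) := by unfold Spec_div_propri; infer_instance

-- ===== CLAIM (what is proved, stated in full; the proofs are below) =====
def Claim_equal_div_propri : Prop := ∀ (ls : List Int), Dom_div_propri ls → Spec_div_propri ls (div_propri ls)

-- ===== LEMMAS AND PROOFS =====

lemma foldl_mul_succ (l : List Int) (n : Int) :
    l.foldl (fun a v => a * (v + 1)) n = n * (l.map (fun v => v + 1)).prod := by
  induction l generalizing n with
  | nil => simp
  | cons x t ih => simp [ih]; ring

-- A's value in closed form: product over distinct elements of (count + 1), minus 2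
lemma div_propri_closed (ls : List Int) :
    div_propri ls =
      ((PySem.Set.ofList ls).map (fun k => (ls.count k : Int) + 1)).prod - 2 := by
  have hlen : (PySem.Dict.size (PySem.Dict.counter ls) : Int)
      = PySem.List.len (PySem.Dict.counter ls).values := by
    simp [PySem.Dict.size, PySem.Dict.values, PySem.List.len_eq]
  show (PySem.List.pyRange 0 (PySem.Dict.size (PySem.Dict.counter ls) : Int) 1).foldl
      (fun n i => n * (PySem.List.pyGetD (PySem.Dict.counter ls).values i 0 + 1)) 1 - 2
    = ((PySem.Set.ofList ls).map (fun k => (ls.count k : Int) + 1)).prod - 2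
  rw [hlen, PySem.List.foldl_pyRange_zero_pyGetD (f := fun n v => n * (v + 1))
      (xs := (PySem.Dict.counter ls).values) (d := 0) (init := 1)]
  rw [foldl_mul_succ]
  simp only [PySem.Dict.values, PySem.Dict.items_counter, List.map_map, one_mul]
  simp [Function.comp_def]

lemma mem_dropWhile_eq (x : Int) (rest : List Int)
    (hp : rest.Pairwise (· ≤ ·)) (hx : ∀ y ∈ rest, x ≤ y) :
    x ∉ rest.dropWhile (fun y => y == x) := by
  intro hmem
  cases hd : rest.dropWhile (fun y => y == x) with
  | nil => simp [hd] at hmem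
  | cons y d' =>
    have hy : ¬ (y == x) = true := by
      have := List.head_dropWhile_not (p := fun y => y == x) (l := rest)
        (w := by simp [hd])
      simpa [hd] using this
    have hyne : y ≠ x := by simpa using hy
    have hsub : (rest.dropWhile (fun y => y == x)).Sublist rest :=
      List.dropWhile_sublist _
    have hyrest : y ∈ rest := hsub.mem (by simp [hd])
    have hxy : x ≤ y := hx y hyrest
    rw [hd] at hmem
    rcases List.mem_cons.mp hmem with h | h
    · exact hyne h.symm
    · have hpd : (y :: d').Pairwise (· ≤ ·) := hd ▸ hp.sublist hsub
      have : y ≤ x := (List.pairwise_cons.mp hpd).1 x h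
      exact hyne (le_antisymm this hxy)

lemma perm_ofList_cons (x : Int) (rest : List Int)
    (hp : rest.Pairwise (· ≤ ·)) (hx : ∀ y ∈ rest, x ≤ y) :
    (PySem.Set.ofList (x :: rest)).Perm
      (x :: PySem.Set.ofList (rest.dropWhile (fun y => y == x))) := by
  have hnx := mem_dropWhile_eq x rest hp hx
  rw [List.perm_ext_iff_of_nodup (PySem.Set.nodup_ofList _)]
  · intro a
    simp only [PySem.Set.mem_ofList, List.mem_cons]
    constructor
    · rintro (rfl | ha)
      · exact Or.inl rfl
      · rw [← List.takeWhile_append_dropWhile (p := fun y => y == x) (l := rest)]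
          at ha
      /- element of rest is x or lies in the dropWhile part -/
        rcases List.mem_append.mp ha with h | h
        · exact Or.inl (by simpa using List.mem_takeWhile_imp h)
        · exact Or.inr h
    · rintro (rfl | ha)
      · exact Or.inl rfl
      · exact Or.inr ((List.dropWhile_sublist _).mem ha)
  · exact List.nodup_cons.mpr ⟨by simpa [PySem.Set.mem_ofList] using hnx,
      PySem.Set.nodup_ofList _⟩

lemma count_drop_eq (x k : Int) (rest : List Int) (hk : k ≠ x) :
    (x :: rest).count k = (rest.dropWhile (fun y => y == x)).count k := by
  have ht : (rest.takeWhile (fun y => y == x)).count k = 0 := by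
    rw [List.count_eq_zero]
    intro hmem
    exact hk (by simpa using List.mem_takeWhile_imp hmem)
  have hrest : rest.count k = (rest.dropWhile (fun y => y == x)).count k := by
    conv_lhs => rw [← List.takeWhile_append_dropWhile (p := fun y => y == x) (l := rest)]
    rw [List.count_append, ht, Nat.zero_add]
  rw [List.count_cons_of_ne (Ne.symm hk) , hrest]

lemma count_head_eq (x : Int) (rest : List Int)
    (hp : rest.Pairwise (· ≤ ·)) (hx : ∀ y ∈ rest, x ≤ y) :
    ((x :: rest).count x : Int) = (rest.takeWhile (fun y => y == x)).length + 1 := by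
  have hnx := mem_dropWhile_eq x rest hp hx
  have hd : (rest.dropWhile (fun y => y == x)).count x = 0 :=
    List.count_eq_zero.mpr hnx
  have ht : (rest.takeWhile (fun y => y == x)).count x
      = (rest.takeWhile (fun y => y == x)).length := by
    rw [List.count_eq_length]
    intro y hy
    exact (by simpa using List.mem_takeWhile_imp hy : y = x).symm
  have hnat : (x :: rest).count x = (rest.takeWhile (fun y => y == x)).length + 1 := by
    rw [List.count_cons_self]
    conv_lhs => rw [← List.takeWhile_append_dropWhile (p := fun y => y == x) (l := rest)]
    rw [List.count_append, ht, hd, Nat.add_zero]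
  rw [hnat]
  push_cast
  ring

lemma pvRunLoop_sorted : ∀ (N : ℕ) (s : List Int), s.length ≤ N →
    s.Pairwise (· ≤ ·) → ∀ n : Int,
    pvRunLoop s n = n * ((PySem.Set.ofList s).map (fun k => (s.count k : Int) + 1)).prod := by
  intro N
  induction N with
  | zero =>
    intro s hs _ n
    have : s = [] := List.eq_nil_of_length_eq_zero (Nat.le_zero.mp hs)
    subst this
    simp [pvRunLoop, PySem.Set.ofList]
  | succ N ih =>
    intro s hs hp n
    cases s with
    | nil => simp [pvRunLoop, PySem.Set.ofList]
    | cons x rest =>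
      have hpr : rest.Pairwise (· ≤ ·) := (List.pairwise_cons.mp hp).2
      have hxle : ∀ y ∈ rest, x ≤ y := (List.pairwise_cons.mp hp).1
      set d := rest.dropWhile (fun y => y == x) with hd
      set t := rest.takeWhile (fun y => y == x) with ht
      have hdlen : d.length ≤ N := by
        have h1 : d.length ≤ rest.length := List.length_dropWhile_le _ _
        have h2 : rest.length ≤ N := by simpa using Nat.succ_le_succ_iff.mp hs
        omega
      have hdp : d.Pairwise (· ≤ ·) := hpr.sublist (List.dropWhile_sublist _)
      have step : pvRunLoop (x :: rest) n = pvRunLoop d (n * ((t.length : Int) + 2)) := by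
        simp [pvRunLoop, hd, ht]
      rw [step, ih d hdlen hdp]
      -- rewrite the product over ofList (x :: rest) through the permutation
      have hperm := perm_ofList_cons x rest hpr hxle
      have hmap :
          ((PySem.Set.ofList (x :: rest)).map (fun k => ((x :: rest).count k : Int) + 1)).prod
          = ((x :: PySem.Set.ofList d).map (fun k => ((x :: rest).count k : Int) + 1)).prod :=
        (hperm.map _).prod_eq
      have hcongr :
          (PySem.Set.ofList d).map (fun k => ((x :: rest).count k : Int) + 1)
          = (PySem.Set.ofList d).map (fun k => (d.count k : Int) + 1) := by
        apply List.map_congr_left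
        intro k hk
        have hkd : k ∈ d := (PySem.Set.mem_ofList _ _).mp hk
        have hkx : k ≠ x := by
          intro h; subst h
          exact mem_dropWhile_eq k rest hpr hxle hkd
        rw [count_drop_eq x k rest hkx]
      rw [hmap]
      simp only [List.map_cons, List.prod_cons, hcongr]
      rw [count_head_eq x rest hpr hxle]
      ring

lemma div_propri_alt_closed (ls : List Int) :
    div_propri_alt ls =
      ((PySem.Set.ofList ls).map (fun k => (ls.count k : Int) + 1)).prod - 2 := by
  unfold div_propri_alt
  set s := PySem.List.sorted ls (fun x => x) false with hs
  have hsp : s.Pairwise (· ≤ ·) := by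
    simpa using PySem.List.sorted_pairwise (xs := ls) (key := fun x => x)
  have hperm : s.Perm ls := PySem.List.sorted_perm ls (fun x => x) false
  rw [pvRunLoop_sorted s.length s le_rfl hsp 1, one_mul]
  have hofperm : (PySem.Set.ofList s).Perm (PySem.Set.ofList ls) := by
    rw [List.perm_ext_iff_of_nodup (PySem.Set.nodup_ofList _) (PySem.Set.nodup_ofList _)]
    intro a
    simp only [PySem.Set.mem_ofList]
    exact ⟨fun h => hperm.mem_iff.mp h, fun h => hperm.mem_iff.mpr h⟩
  have hcnt : (PySem.Set.ofList s).map (fun k => (s.count k : Int) + 1)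
      = (PySem.Set.ofList s).map (fun k => (ls.count k : Int) + 1) := by
    apply List.map_congr_left
    intro k _
    rw [hperm.count_eq]
  rw [hcnt, (hofperm.map _).prod_eq]

-- ===== VERDICT (by name: the statement is the Claim_ definition above) =====
theorem div_propri_spec : Claim_equal_div_propri := by
  intro ls _
  unfold Spec_div_propri
  rw [div_propri_closed, div_propri_alt_closed]
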